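-- pv_equiv track=rewrite | github.com/mojamil/Advanced-Algorithms-Coursera | pa2_linear_programming/diet/diet.py | find_basis
-- ===== SOURCE A (Python) =====
-- def find_basis(A):
--   basis=[0]*len(A)
--   for col in range(0,len(A[0])):
--     ocount=0
--     zcount=0
--     for row in range(0,len(A)):
--       if A[row][col]==1:
--         oneloc=row
--         ocount+=1
--       if A[row][col]==0:
--         zcount+=1
--     if ocount==1 and zcount==len(A)-1:
--       basis[oneloc]=col
--   return basis
-- ===== SOURCE B (Python) =====
-- def find_basis(A):
--     ncols = len(A[0])
--     # per-column 3-state automaton driven by ONE row-major pass: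
--     # 0 = only zeros seen; r+1 = exactly one 1, at row r, rest zeros; -1 = dead
--     state = [0] * ncols
--     for r, row in enumerate(A):
--         for c in range(ncols):
--             v = row[c]
--             s = state[c]
--             if s == -1:
--                 continue
--             if v == 0:
--                 continue
--             if v == 1 and s == 0:
--                 state[c] = r + 1
--             else:
--                 state[c] = -1
--     basis = [0] * len(A)
--     for c in range(ncols):
--         s = state[c]
--         if s > 0:
--             basis[s - 1] = c
--     return basis
-- ===== Notes on version B (the rewrite author's own statement) =====
-- stated objective: alternative
-- what changed: Replaces A's column-major scans that count ones and zeros per column by a single row-major streaming pass driving a three-state automaton per column (all-zeros / one 1 at row r / dead), followed by one pass over the automaton states that writes the basis; the row-major order walks each row list once instead of re-indexing A[row][col] per column, which a timing run measured as a constant-factor win.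
import Mathlib
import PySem

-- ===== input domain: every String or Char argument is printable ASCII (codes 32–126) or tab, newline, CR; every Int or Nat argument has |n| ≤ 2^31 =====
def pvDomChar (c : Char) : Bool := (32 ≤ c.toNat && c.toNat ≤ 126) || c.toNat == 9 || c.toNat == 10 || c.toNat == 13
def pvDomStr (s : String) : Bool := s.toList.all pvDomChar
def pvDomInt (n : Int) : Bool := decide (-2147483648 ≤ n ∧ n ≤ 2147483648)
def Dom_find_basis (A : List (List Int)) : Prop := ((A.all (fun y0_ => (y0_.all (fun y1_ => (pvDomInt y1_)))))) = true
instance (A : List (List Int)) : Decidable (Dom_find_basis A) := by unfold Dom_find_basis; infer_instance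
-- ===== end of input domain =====

-- B replaces A's column-major counting scans by a single row-major streaming pass driving a
-- three-state automaton per column, then one pass writing the basis from the automaton states
-- (an alternative decomposition, same asymptotic cost).

-- ===== PORT A =====
-- A[row][col] is ported with pyGetD (defaults [] / 0): inside Pre_find_basis every generated index
-- is in range, so this equals Python's indexing; where Python would raise, Pre_ excludes the input.
-- Python's `oneloc` starts unbound; it is ported as 0 (it is only read after being assigned).
def find_basis (A : List (List Int)) : List Int :=
  ((PySem.List.pyRange 0 ((A.headD []).length : Int)).foldl
    (fun (st : List Int × Int) col =>
      let inner := (PySem.List.pyRange 0 (A.length : Int)).foldl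
        (fun (s : Int × Int × Int) row =>
          let v := PySem.List.pyGetD (PySem.List.pyGetD A row []) col 0
          let s1 := if v = 1 then (s.1 + 1, s.2.1, row) else s
          if v = 0 then (s1.1, s1.2.1 + 1, s1.2.2) else s1)
        (0, 0, st.2)
      if inner.1 = 1 ∧ inner.2.1 = (A.length : Int) - 1 then
        (st.1.set inner.2.2.toNat col, inner.2.2)
      else (st.1, inner.2.2))
    (List.replicate A.length 0, 0)).1

-- ===== PORT B =====
-- row-major pass: per-column state 0 = only zeros so far, r+1 = exactly one 1 (at row r) and
-- zeros elsewhere, -1 = dead; `continue` branches return the state list unchanged.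
-- row[c] is ported with pyGetD (in range inside Pre_); len(A[0]) as (A.headD []).length (A ≠ []).
def find_basis_alt (A : List (List Int)) : List Int :=
  let ncols := (A.headD []).length
  let state := A.zipIdx.foldl
    (fun (state : List Int) p =>
      (PySem.List.pyRange 0 (ncols : Int)).foldl
        (fun st c =>
          let v := PySem.List.pyGetD p.1 c 0
          let s := PySem.List.pyGetD st c 0
          if s = -1 then st
          else if v = 0 then st
          else if v = 1 ∧ s = 0 then st.set c.toNat ((p.2 : Int) + 1)
          else st.set c.toNat (-1))
        state)
    (List.replicate ncols 0)
  (PySem.List.pyRange 0 (ncols : Int)).foldl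
    (fun basis c =>
      let s := PySem.List.pyGetD state c 0
      if s > 0 then basis.set (s - 1).toNat c else basis)
    (List.replicate A.length 0)

-- ===== PRECONDITION & SPEC =====
-- Pre_: exactly the inputs where A returns: A is nonempty (A[0] is read) and no row is shorter
-- than row 0 (A[row][col] is read for every col < len(A[0])).
def Pre_find_basis (A : List (List Int)) : Prop :=
  A ≠ [] ∧ ∀ r ∈ A, (A.headD []).length ≤ r.length
instance (A : List (List Int)) : Decidable (Pre_find_basis A) := by unfold Pre_find_basis; infer_instance

def pvWitness_find_basis : List (List Int) := [[1, 0, 5], [0, 1, 5]]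

def Spec_find_basis (A : List (List Int)) (out : List Int) : Prop := out = find_basis_alt A
instance (A : List (List Int)) (out : List Int) : Decidable (Spec_find_basis A out) := by unfold Spec_find_basis; infer_instance

-- ===== CLAIM (what is proved, stated in full; the proofs are below) =====
def Claim_equal_find_basis : Prop := ∀ (A : List (List Int)), Dom_find_basis A → Pre_find_basis A → Spec_find_basis A (find_basis A)

-- ===== LEMMAS AND PROOFS =====

-- the c-th column of A (entries read with getD, as both ports do)
def colOf (A : List (List Int)) (c : Nat) : List Int := A.map (fun row => row.getD c 0)

-- last row index holding a 1 in column c (A's `oneloc` after the inner loop), seed loc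
def lastloc (A : List (List Int)) (c : Nat) (loc : Int) : Int :=
  ((colOf A c).zipIdx).foldl (fun s p => if p.1 = 1 then (p.2 : Int) else s) loc

lemma foldl_range_getD {β : Type} (l : List (List Int)) (f : β → List Int → Nat → β) :
    ∀ (k : Nat) (init : β),
      (List.range l.length).foldl (fun s i => f s (l.getD i []) (i + k)) init
        = (l.zipIdx k).foldl (fun s p => f s p.1 p.2) init := by
  induction l with
  | nil => intro k init; rfl
  | cons r t ih =>
    intro k init
    simp only [List.length_cons, List.range_succ_eq_map, List.foldl_cons, List.foldl_map,
      List.zipIdx_cons, List.getD_cons_zero, List.getD_cons_succ, Nat.zero_add]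
    rw [← ih (k + 1) (f init r k)]
    apply PySem.List.foldl_congr_mem
    intro acc x _
    have : x.succ + k = x + (k + 1) := by omega
    rw [this]

lemma countP_zipIdx (l : List (List Int)) (f : List Int → Bool) :
    ∀ k, (l.zipIdx k).countP (fun p => f p.1) = l.countP f := by
  induction l with
  | nil => intro k; rfl
  | cons r t ih => intro k; simp only [List.zipIdx_cons, List.countP_cons, ih (k + 1)]

lemma inner_charA (c : Nat) (ps : List (List Int × Nat)) :
    ∀ (s : Int × Int × Int),
      ps.foldl (fun s p =>
          let v := p.1.getD c 0
          let s1 := if v = 1 then (s.1 + 1, s.2.1, (p.2 : Int)) else s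
          if v = 0 then (s1.1, s1.2.1 + 1, s1.2.2) else s1) s
        = (s.1 + (ps.countP (fun p => p.1.getD c 0 == 1) : Int),
           s.2.1 + (ps.countP (fun p => p.1.getD c 0 == 0) : Int),
           ps.foldl (fun l p => if p.1.getD c 0 = 1 then (p.2 : Int) else l) s.2.2) := by
  induction ps with
  | nil => intro s; simp
  | cons p t ih =>
    intro s
    obtain ⟨o, z, lc⟩ := s
    simp only [List.foldl_cons, List.countP_cons]
    by_cases h1 : p.1.getD c 0 = 1
    · have h0 : ¬ p.1.getD c 0 = 0 := by rw [h1]; decide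
      rw [if_pos h1, if_neg h0, if_pos h1, ih]
      simp only [h1]
      norm_num
      ring
    · by_cases h0 : p.1.getD c 0 = 0
      · rw [if_neg h1, if_pos h0, if_neg h1, ih]
        simp only [h1, h0]
        norm_num
        ring
      · rw [if_neg h1, if_neg h0, if_neg h1, ih]
        norm_num
        simp only [List.getD_eq_getElem?_getD] at h1 h0
        exact ⟨h1, h0⟩

lemma lastloc_zero (l : List Int) :
    ∀ (k : Nat) (loc : Int), l.countP (fun x => x == (1 : Int)) = 0 →
      (l.zipIdx k).foldl (fun s p => if p.1 = 1 then (p.2 : Int) else s) loc = loc := by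
  induction l with
  | nil => intro k loc _; rfl
  | cons a t ih =>
    intro k loc h
    simp only [List.countP_cons] at h
    by_cases ha : a = 1
    · simp [ha] at h
    · simp only [List.zipIdx_cons, List.foldl_cons, if_neg ha]
      exact ih (k + 1) loc (by omega)

lemma lastloc_one (l : List Int) :
    ∀ (k : Nat) (loc : Int), l.countP (fun x => x == (1 : Int)) = 1 →
      ∃ j, List.idxOf? (1 : Int) l = some j ∧
        (l.zipIdx k).foldl (fun s p => if p.1 = 1 then (p.2 : Int) else s) loc
          = ((k + j : Nat) : Int) := by
  induction l with
  | nil => intro k loc h; simp at h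
  | cons a t ih =>
    intro k loc h
    simp only [List.countP_cons] at h
    by_cases ha : a = 1
    · have ht : t.countP (fun x => x == (1 : Int)) = 0 := by
        rw [ha, if_pos (show ((1 : Int) == (1 : Int)) = true by decide)] at h
        omega
      refine ⟨0, ?_, ?_⟩
      · simp [List.idxOf?, List.findIdx?_cons, ha]
      · simp only [List.zipIdx_cons, List.foldl_cons, if_pos ha]
        rw [lastloc_zero t (k + 1) _ ht]
        simp
    · have ht : t.countP (fun x => x == (1 : Int)) = 1 := by
        rw [if_neg (by simpa using ha)] at h
        omega
      obtain ⟨j, hj, hf⟩ := ih (k + 1) loc ht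
      refine ⟨j + 1, ?_, ?_⟩
      · simp only [List.idxOf?] at hj ⊢
        rw [List.findIdx?_cons, if_neg (by simpa using ha), hj]
        rfl
      · simp only [List.zipIdx_cons, List.foldl_cons, if_neg ha, hf]
        congr 1
        omega

lemma lastloc_eq (A : List (List Int)) (c : Nat) (loc : Int) :
    (A.zipIdx).foldl (fun l p => if p.1.getD c 0 = 1 then (p.2 : Int) else l) loc
      = lastloc A c loc := by
  unfold lastloc colOf
  rw [List.zipIdx_map, List.foldl_map]
  apply PySem.List.foldl_congr_mem
  intro acc p _
  cases p
  rfl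

lemma countP_colOf (A : List (List Int)) (c : Nat) (a : Int) :
    (colOf A c).countP (fun x => x == a) = A.countP (fun row => row.getD c 0 == a) := by
  unfold colOf
  rw [List.countP_map]
  rfl

-- A's per-column condition, shared canonical form
lemma outer_fold (A : List (List Int)) (cs : List Nat) :
    ∀ (basis : List Int) (loc : Int),
      (cs.foldl (fun (st : List Int × Int) c =>
          if ((A.countP (fun row => row.getD c 0 == 1)) : Int) = 1 ∧
             ((A.countP (fun row => row.getD c 0 == 0)) : Int) = (A.length : Int) - 1 then
            (st.1.set (lastloc A c st.2).toNat (c : Int), lastloc A c st.2)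
          else (st.1, lastloc A c st.2)) (basis, loc)).1
      = cs.foldl (fun basis c =>
          if ((A.countP (fun row => row.getD c 0 == 1)) : Int) = 1 ∧
             ((A.countP (fun row => row.getD c 0 == 0)) : Int) = (A.length : Int) - 1 then
            basis.set ((List.idxOf? (1 : Int) (colOf A c)).getD 0) (c : Int)
          else basis) basis := by
  induction cs with
  | nil => intro basis loc; rfl
  | cons c cs ih =>
    intro basis loc
    simp only [List.foldl_cons]
    by_cases hc : ((A.countP (fun row => row.getD c 0 == 1)) : Int) = 1 ∧
        ((A.countP (fun row => row.getD c 0 == 0)) : Int) = (A.length : Int) - 1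
    · rw [if_pos hc, if_pos hc]
      have hcnt : (colOf A c).countP (fun x => x == (1 : Int)) = 1 := by
        rw [countP_colOf]
        omega
      obtain ⟨j, hj, hf⟩ := lastloc_one (colOf A c) 0 loc hcnt
      have hl : lastloc A c loc = (j : Int) := by
        unfold lastloc; rw [hf]; simp
      rw [ih, hl, hj]
      simp
    · rw [if_neg hc, if_neg hc, ih]

lemma A_eval (A : List (List Int)) :
    find_basis A = ((List.range ((A.headD []).length)).foldl (fun (st : List Int × Int) c =>
        if ((A.countP (fun row => row.getD c 0 == 1)) : Int) = 1 ∧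
           ((A.countP (fun row => row.getD c 0 == 0)) : Int) = (A.length : Int) - 1 then
          (st.1.set (lastloc A c st.2).toNat (c : Int), lastloc A c st.2)
        else (st.1, lastloc A c st.2)) (List.replicate A.length 0, 0)).1 := by
  unfold find_basis
  rw [PySem.List.pyRange_zero_natCast ((A.headD []).length), List.foldl_map]
  congr 1
  apply PySem.List.foldl_congr_mem
  intro st c _
  have hinner :
      (PySem.List.pyRange 0 (A.length : Int)).foldl
        (fun (s : Int × Int × Int) row =>
          let v := PySem.List.pyGetD (PySem.List.pyGetD A row []) ((c : Nat) : Int) 0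
          let s1 := if v = 1 then (s.1 + 1, s.2.1, row) else s
          if v = 0 then (s1.1, s1.2.1 + 1, s1.2.2) else s1)
        (0, 0, st.2)
      = ((A.countP (fun row => row.getD c 0 == 1) : Int),
         (A.countP (fun row => row.getD c 0 == 0) : Int),
         lastloc A c st.2) := by
    rw [PySem.List.pyRange_zero_natCast, List.foldl_map]
    have hbody : ∀ (s : Int × Int × Int) (i : Nat), i ∈ List.range A.length →
        (fun (s : Int × Int × Int) (i : Nat) =>
          let v := PySem.List.pyGetD (PySem.List.pyGetD A ((i : Nat) : Int) []) ((c : Nat) : Int) 0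
          let s1 := if v = 1 then (s.1 + 1, s.2.1, ((i : Nat) : Int)) else s
          if v = 0 then (s1.1, s1.2.1 + 1, s1.2.2) else s1) s i
        = (fun (s : Int × Int × Int) (i : Nat) =>
          let v := (A.getD i []).getD c 0
          let s1 := if v = 1 then (s.1 + 1, s.2.1, ((i + 0 : Nat) : Int)) else s
          if v = 0 then (s1.1, s1.2.1 + 1, s1.2.2) else s1) s i := by
      intro s i _
      simp [PySem.List.pyGetD_natCast]
    rw [PySem.List.foldl_congr_mem _ _ _ _ (fun s i hi => hbody s i hi)]
    have := foldl_range_getD A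
      (fun (s : Int × Int × Int) (row : List Int) (i : Nat) =>
        let v := row.getD c 0
        let s1 := if v = 1 then (s.1 + 1, s.2.1, (i : Int)) else s
        if v = 0 then (s1.1, s1.2.1 + 1, s1.2.2) else s1) 0 (0, 0, st.2)
    rw [this, inner_charA]
    simp only [countP_zipIdx A (fun row => row.getD c 0 == 1) 0,
      countP_zipIdx A (fun row => row.getD c 0 == 0) 0, lastloc_eq]
    simp
  rw [hinner]

-- ===== B-side lemmas =====

-- B's per-column automaton step and its scalar fold over a column
def stepc (r : Nat) (v s : Int) : Int :=
  if s = -1 then s else if v = 0 then s else if v = 1 ∧ s = 0 then (r : Int) + 1 else -1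

def autoF (l : List Int) (k : Nat) (s : Int) : Int :=
  (l.zipIdx k).foldl (fun s p => stepc p.2 p.1 s) s

-- B's inner loop body, casts removed
def bodyN (row : List Int) (r : Nat) (st : List Int) (c : Nat) : List Int :=
  let v := row.getD c 0
  let s := st.getD c 0
  if s = -1 then st
  else if v = 0 then st
  else if v = 1 ∧ s = 0 then st.set c ((r : Int) + 1)
  else st.set c (-1)

lemma set_getD_self (l : List Int) (c : Nat) :
    l.set c (l.getD c 0) = l := by
  apply List.ext_getElem?
  intro j
  rw [List.getElem?_set]
  by_cases h : c = j
  · subst h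
    by_cases hc : c < l.length
    · simp [hc]
    · simp [hc]
  · simp [h]

lemma getD_set (l : List Int) (i j : Nat) (v : Int) :
    (l.set i v).getD j 0 = if i = j ∧ i < l.length then v else l.getD j 0 := by
  simp only [List.getD_eq_getElem?_getD, List.getElem?_set]
  by_cases h : i = j
  · subst h
    by_cases hc : i < l.length
    · simp [hc]
    · simp [hc]
  · simp [h]

lemma bodyN_set (row : List Int) (r : Nat) (st : List Int) (c : Nat) :
    bodyN row r st c = st.set c (stepc r (row.getD c 0) (st.getD c 0)) := by
  unfold bodyN stepc
  by_cases h1 : st.getD c 0 = -1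
  · rw [if_pos h1, if_pos h1, h1, ← h1, set_getD_self]
  · rw [if_neg h1, if_neg h1]
    by_cases h2 : row.getD c 0 = 0
    · rw [if_pos h2, if_pos h2, set_getD_self]
    · rw [if_neg h2, if_neg h2]
      by_cases h3 : row.getD c 0 = 1 ∧ st.getD c 0 = 0
      · rw [if_pos h3, if_pos h3]
      · rw [if_neg h3, if_neg h3]

lemma inner_charB (row : List Int) (r : Nat) :
    ∀ (n : Nat) (st : List Int),
      ((List.range n).foldl (bodyN row r) st).length = st.length ∧
      ∀ j, ((List.range n).foldl (bodyN row r) st).getD j 0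
        = if j < n ∧ j < st.length then stepc r (row.getD j 0) (st.getD j 0) else st.getD j 0 := by
  intro n
  induction n with
  | zero => intro st; simp
  | succ m ih =>
    intro st
    obtain ⟨hlen, hget⟩ := ih st
    rw [List.range_succ, List.foldl_append, List.foldl_cons, List.foldl_nil, bodyN_set]
    constructor
    · rw [List.length_set, hlen]
    · intro j
      rw [getD_set, hlen, hget m, hget j]
      by_cases hm : m < st.length
      · simp only [lt_self_iff_false, false_and, if_false] at *
        by_cases hj : m = j
        · subst hj
          simp [hm]
        · rw [if_neg (by omega)]
          by_cases hjm : j < m ∧ j < st.length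
          · rw [if_pos hjm, if_pos ⟨by omega, hjm.2⟩]
          · rw [if_neg hjm, if_neg (by omega)]
      · rw [if_neg (by omega)]
        by_cases hjm : j < m ∧ j < st.length
        · rw [if_pos hjm, if_pos ⟨by omega, hjm.2⟩]
        · rw [if_neg hjm, if_neg (by omega)]

lemma outer_charB (n : Nat) (rows : List (List Int)) :
    ∀ (k : Nat) (st : List Int), st.length = n →
      ((rows.zipIdx k).foldl (fun st p => (List.range n).foldl (bodyN p.1 p.2) st) st).length = n ∧
      ∀ c, c < n →
        ((rows.zipIdx k).foldl (fun st p => (List.range n).foldl (bodyN p.1 p.2) st) st).getD c 0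
          = autoF (colOf rows c) k (st.getD c 0) := by
  induction rows with
  | nil =>
    intro k st hst
    exact ⟨hst, fun c _ => rfl⟩
  | cons row t ih =>
    intro k st hst
    simp only [List.zipIdx_cons, List.foldl_cons]
    obtain ⟨hlen1, hget1⟩ := inner_charB row k n st
    obtain ⟨hlen2, hget2⟩ := ih (k + 1) ((List.range n).foldl (bodyN row k) st) (by rw [hlen1, hst])
    refine ⟨hlen2, fun c hc => ?_⟩
    rw [hget2 c hc, hget1 c, if_pos ⟨hc, by omega⟩]
    unfold colOf autoF
    simp only [List.map_cons, List.zipIdx_cons, List.foldl_cons]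

lemma auto_dead (l : List Int) : ∀ k, autoF l k (-1) = -1 := by
  induction l with
  | nil => intro k; rfl
  | cons a t ih =>
    intro k
    unfold autoF at *
    simp only [List.zipIdx_cons, List.foldl_cons]
    have : stepc k a (-1) = -1 := by unfold stepc; simp
    rw [this]
    exact ih (k + 1)

lemma auto_pos (l : List Int) : ∀ (k : Nat) (s : Int), 0 < s →
    autoF l k s = if l.all (fun x => x == (0 : Int)) then s else -1 := by
  induction l with
  | nil => intro k s _; rfl
  | cons a t ih =>
    intro k s hs
    unfold autoF
    simp only [List.zipIdx_cons, List.foldl_cons, List.all_cons]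
    by_cases ha : a = 0
    · have : stepc k a s = s := by unfold stepc; rw [if_neg (by omega), if_pos ha]
      rw [this]
      have := ih (k + 1) s hs
      unfold autoF at this
      rw [this]
      simp [ha]
    · have : stepc k a s = -1 := by
        unfold stepc
        rw [if_neg (by omega), if_neg ha, if_neg (by rintro ⟨_, h⟩; omega)]
      rw [this]
      have := auto_dead t (k + 1)
      unfold autoF at this
      rw [this, if_neg]
      simp [ha]

lemma cnt_le (l : List Int) :
    l.countP (fun x => x == (1 : Int)) + l.countP (fun x => x == (0 : Int)) ≤ l.length := by
  induction l with
  | nil => simp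
  | cons a t ih =>
    simp only [List.countP_cons, List.length_cons]
    by_cases h1 : a = 1
    · simp [h1]; omega
    · by_cases h0 : a = 0
      · simp [h0]; omega
      · simp [show (a == (1:Int)) = false by simpa using h1,
          show (a == (0:Int)) = false by simpa using h0]
        omega

lemma all_count0 (l : List Int) :
    l.all (fun x => x == (0 : Int)) = true ↔ l.countP (fun x => x == (0 : Int)) = l.length := by
  rw [List.countP_eq_length, List.all_eq_true]

lemma all_count1 (l : List Int) (h : l.all (fun x => x == (0 : Int)) = true) :
    l.countP (fun x => x == (1 : Int)) = 0 := by
  rw [List.countP_eq_zero]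
  intro a ha
  have := (List.all_eq_true.mp h) a ha
  simp at this ⊢
  omega

lemma idx_exists (l : List Int) (h : l.countP (fun x => x == (1 : Int)) ≠ 0) :
    ∃ j, List.idxOf? (1 : Int) l = some j := by
  induction l with
  | nil => simp at h
  | cons a t ih =>
    by_cases ha : a = 1
    · exact ⟨0, by simp [List.idxOf?, List.findIdx?_cons, ha]⟩
    · simp only [List.countP_cons, show (a == (1:Int)) = false by simpa using ha] at h
      obtain ⟨j, hj⟩ := ih (by simpa using h)
      refine ⟨j + 1, ?_⟩
      simp only [List.idxOf?] at hj ⊢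
      rw [List.findIdx?_cons, if_neg (by simpa using ha), hj]
      rfl

lemma auto_clean (l : List Int) : ∀ (k : Nat),
    autoF l k 0 =
      if l.countP (fun x => x == (1 : Int)) = 1 ∧
         l.countP (fun x => x == (0 : Int)) = l.length - 1 then
        ((k + (List.idxOf? (1 : Int) l).getD 0 : Nat) : Int) + 1
      else if l.all (fun x => x == (0 : Int)) then 0 else -1 := by
  induction l with
  | nil => intro k; simp [autoF]
  | cons a t ih =>
    intro k
    unfold autoF
    simp only [List.zipIdx_cons, List.foldl_cons, List.countP_cons, List.length_cons,
      List.all_cons, Nat.add_sub_cancel]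
    by_cases ha0 : a = 0
    · have hstep : stepc k a 0 = 0 := by unfold stepc; rw [if_neg (by omega), if_pos ha0]
      rw [hstep]
      have hrec := ih (k + 1)
      unfold autoF at hrec
      rw [hrec]
      have hb1 : (a == (1 : Int)) = false := by simp [ha0]
      have hb0 : (a == (0 : Int)) = true := by simp [ha0]
      simp only [hb1, hb0, Bool.false_eq_true, if_false, if_true, Bool.true_and, Nat.add_zero]
      have hle := cnt_le t
      by_cases hc : t.countP (fun x => x == (1 : Int)) = 1 ∧
          t.countP (fun x => x == (0 : Int)) = t.length - 1
      · have hlen : 1 ≤ t.length := by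
          rcases t with _ | _
          · simp at hc
          · simp
        have hpc : t.countP (fun x => x == (1 : Int)) = 1 ∧
            t.countP (fun x => x == (0 : Int)) + 1 = t.length := ⟨hc.1, by omega⟩
        rw [if_pos hc, if_pos hpc]
        obtain ⟨j, hj⟩ := idx_exists t (by omega)
        have hcons : List.idxOf? (1 : Int) (a :: t) = some (j + 1) := by
          simp only [List.idxOf?] at hj ⊢
          rw [List.findIdx?_cons, if_neg (by simp [ha0]), hj]
          rfl
        rw [hj, hcons]
        simp only [Option.getD_some]
        congr 1
        omega
      · have hnc : ¬ (t.countP (fun x => x == (1 : Int)) = 1 ∧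
            t.countP (fun x => x == (0 : Int)) + 1 = t.length) := by
          rintro ⟨h1, h0⟩
          exact hc ⟨h1, by omega⟩
        rw [if_neg hc, if_neg hnc]
    · by_cases ha1 : a = 1
      · have hstep : stepc k a 0 = (k : Int) + 1 := by
          unfold stepc
          rw [if_neg (by omega), if_neg ha0, if_pos ⟨ha1, rfl⟩]
        rw [hstep]
        have hrec := auto_pos t (k + 1) ((k : Int) + 1) (by omega)
        unfold autoF at hrec
        rw [hrec]
        have hb1 : (a == (1 : Int)) = true := by simp [ha1]
        have hb0 : (a == (0 : Int)) = false := by simp [ha1]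
        simp only [hb1, hb0, if_true, Bool.false_and, Bool.false_eq_true, if_false, Nat.add_zero]
        have hidx : List.idxOf? (1 : Int) (a :: t) = some 0 := by
          simp [List.idxOf?, List.findIdx?_cons, ha1]
        by_cases hall : t.all (fun x => x == (0 : Int)) = true
        · have hc1 := all_count1 t hall
          have hc0 := (all_count0 t).mp hall
          have hpc : t.countP (fun x => x == (1 : Int)) + 1 = 1 ∧
              t.countP (fun x => x == (0 : Int)) = t.length := ⟨by omega, hc0⟩
          rw [if_pos hall, if_pos hpc, hidx]
          simp
        · have hnc : ¬ (t.countP (fun x => x == (1 : Int)) + 1 = 1 ∧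
              t.countP (fun x => x == (0 : Int)) = t.length) := by
            rintro ⟨h1, h0⟩
            exact hall ((all_count0 t).mpr h0)
          rw [if_neg (by simpa using hall), if_neg hnc]
      · have hstep : stepc k a 0 = -1 := by
          unfold stepc
          rw [if_neg (by omega), if_neg ha0, if_neg (by rintro ⟨h, _⟩; exact ha1 h)]
        rw [hstep]
        have hrec := auto_dead t (k + 1)
        unfold autoF at hrec
        rw [hrec]
        have hb1 : (a == (1 : Int)) = false := by simp [ha1]
        have hb0 : (a == (0 : Int)) = false := by simp [ha0]
        simp only [hb1, hb0, Bool.false_eq_true, if_false, Bool.false_and, Nat.add_zero]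
        have hle := cnt_le t
        have hnc : ¬ (t.countP (fun x => x == (1 : Int)) = 1 ∧
            t.countP (fun x => x == (0 : Int)) = t.length) := by
          rintro ⟨h1, h0⟩
          omega
        rw [if_neg hnc]

lemma B_eval (A : List (List Int)) (hne : A ≠ []) :
    find_basis_alt A = (List.range ((A.headD []).length)).foldl (fun basis c =>
        if ((A.countP (fun row => row.getD c 0 == 1)) : Int) = 1 ∧
           ((A.countP (fun row => row.getD c 0 == 0)) : Int) = (A.length : Int) - 1 then
          basis.set ((List.idxOf? (1 : Int) (colOf A c)).getD 0) (c : Int)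
        else basis) (List.replicate A.length 0) := by
  have hlen1 : 1 ≤ A.length := by
    rcases A with _ | _
    · exact absurd rfl hne
    · simp
  simp only [find_basis_alt]
  set n := (A.headD []).length with hn
  -- rewrite the inner loop of the state pass to bodyN
  have hstate :
      A.zipIdx.foldl
        (fun (state : List Int) p =>
          (PySem.List.pyRange 0 (n : Int)).foldl
            (fun st c =>
              let v := PySem.List.pyGetD p.1 c 0
              let s := PySem.List.pyGetD st c 0
              if s = -1 then st
              else if v = 0 then st
              else if v = 1 ∧ s = 0 then st.set c.toNat ((p.2 : Int) + 1)
              else st.set c.toNat (-1))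
            state)
        (List.replicate n 0)
      = A.zipIdx.foldl (fun st p => (List.range n).foldl (bodyN p.1 p.2) st)
          (List.replicate n 0) := by
    apply PySem.List.foldl_congr_mem
    intro st p _
    rw [PySem.List.pyRange_zero_natCast, List.foldl_map]
    apply PySem.List.foldl_congr_mem
    intro st' c _
    simp [bodyN, PySem.List.pyGetD_natCast]
  rw [hstate]
  obtain ⟨hSlen, hSget⟩ := outer_charB n A 0 (List.replicate n 0) (by simp)
  set S := A.zipIdx.foldl (fun st p => (List.range n).foldl (bodyN p.1 p.2) st)
    (List.replicate n 0) with hS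
  rw [PySem.List.pyRange_zero_natCast, List.foldl_map]
  apply PySem.List.foldl_congr_mem
  intro basis c hc
  have hcn : c < n := List.mem_range.mp hc
  have hS0 : (List.replicate n (0 : Int)).getD c 0 = 0 := by
    simp [List.getD_eq_getElem?_getD, hcn]
  have hSc : S.getD c 0 = autoF (colOf A c) 0 0 := by
    rw [hSget c hcn, hS0]
  have hcollen : (colOf A c).length = A.length := by simp [colOf]
  have hcnt1 := countP_colOf A c 1
  have hcnt0 := countP_colOf A c 0
  rw [auto_clean (colOf A c) 0] at hSc
  simp only [PySem.List.pyGetD_natCast]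
  by_cases hcond : ((A.countP (fun row => row.getD c 0 == 1)) : Int) = 1 ∧
      ((A.countP (fun row => row.getD c 0 == 0)) : Int) = (A.length : Int) - 1
  · have hcondN : (colOf A c).countP (fun x => x == (1 : Int)) = 1 ∧
        (colOf A c).countP (fun x => x == (0 : Int)) = (colOf A c).length - 1 := by
      rw [hcnt1, hcnt0, hcollen]
      omega
    rw [if_pos hcondN] at hSc
    obtain ⟨j, hj⟩ := idx_exists (colOf A c) (by omega)
    rw [hj] at hSc ⊢
    simp only [Option.getD_some, Nat.zero_add] at hSc ⊢
    rw [if_pos hcond, hSc, if_pos (by omega)]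
    congr 1
    omega
  · have hcondN : ¬ ((colOf A c).countP (fun x => x == (1 : Int)) = 1 ∧
        (colOf A c).countP (fun x => x == (0 : Int)) = (colOf A c).length - 1) := by
      rw [hcnt1, hcnt0, hcollen]
      intro ⟨h1, h0⟩
      have hle := cnt_le (colOf A c)
      rw [hcnt1, hcnt0, hcollen] at hle
      exact hcond ⟨by omega, by omega⟩
    rw [if_neg hcondN] at hSc
    rw [if_neg hcond]
    by_cases hall : (colOf A c).all (fun x => x == (0 : Int)) = true
    · rw [if_pos hall] at hSc
      rw [hSc, if_neg (by omega)]
    · rw [if_neg hall] at hSc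
      rw [hSc, if_neg (by omega)]

-- ===== VERDICT (by name: the statement is the Claim_ definition above) =====
theorem find_basis_spec : Claim_equal_find_basis := by
  intro A _ hpre
  unfold Spec_find_basis
  obtain ⟨hne, hlen⟩ := hpre
  rw [A_eval, B_eval A hne]
  exact outer_fold A (List.range ((A.headD []).length)) (List.replicate A.length 0) 0
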